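-- pv_equiv track=rewrite | github.com/pvnieo/project-euler-solutions | python version/51.py | is_sub_in_l
-- ===== SOURCE A (Python) =====
-- def is_sub_in_l(a, b):
--     """Verify if elements of a in b and b - a is composed from the same digit"""
--     b = list(map(int, str(b)))
--     for x in a:
--         try:
--             b.remove(x)
--         except ValueError:
--             return False
--     if len(set(b)) == 1:
--         return True
--     return False
-- ===== SOURCE B (Python) =====
-- def is_sub_in_l(a, b):
--     """Verify if elements of a in b and b - a is composed from the same digit"""
--     cb = {}
--     for d in str(b):
--         d = int(d)
--         cb[d] = cb.get(d, 0) + 1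
--     ca = {}
--     for x in a:
--         ca[x] = ca.get(x, 0) + 1
--     if any(ca[k] > cb.get(k, 0) for k in ca):
--         return False
--     return sum(1 for k in cb if cb[k] - ca.get(k, 0) > 0) == 1
-- ===== Notes on version B (the rewrite author's own statement) =====
-- stated objective: alternative
-- what changed: Replaces the element-by-element remove loop with try/except by building digit/element count dictionaries once, testing multiset inclusion via counts and counting the distinct digits with a positive remaining count.
import Mathlib
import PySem

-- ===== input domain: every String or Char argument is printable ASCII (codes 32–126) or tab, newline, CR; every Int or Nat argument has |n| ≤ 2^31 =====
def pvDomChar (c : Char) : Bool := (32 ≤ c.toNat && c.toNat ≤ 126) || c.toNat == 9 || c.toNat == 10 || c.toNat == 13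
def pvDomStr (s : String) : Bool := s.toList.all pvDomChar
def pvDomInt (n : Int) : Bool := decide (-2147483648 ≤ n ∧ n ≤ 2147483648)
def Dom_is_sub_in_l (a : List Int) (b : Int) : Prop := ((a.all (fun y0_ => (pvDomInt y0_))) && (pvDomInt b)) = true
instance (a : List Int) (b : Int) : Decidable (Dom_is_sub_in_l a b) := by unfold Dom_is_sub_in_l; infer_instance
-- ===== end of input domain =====

-- B replaces A's element-by-element removal loop (with exception handling) by two count
-- dictionaries, a multiset-inclusion test on counts, and a count of digits left over.


-- list(map(int, str(b))) — shared by both Pythons; 'int' of a one-character string.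
-- Exact for b ≥ 0 (Pre_); for b < 0 Python raises ValueError on '-' (excluded by Pre_).
def digitsOf (b : Int) : List Int :=
  (PySem.Int.toStr b).toList.map (fun c => (PySem.Int.ofStr? (String.ofList [c])).getD 0)

-- ===== PORT A =====
-- the for-loop over a: remove each x from the remaining digit list, None = ValueError = return False
def goA : List Int → List Int → Option (List Int)
  | [], bs => some bs
  | x :: xs, bs =>
    match PySem.List.remove? bs x with
    | none => none
    | some bs' => goA xs bs'

def is_sub_in_l (a : List Int) (b : Int) : Bool :=
  match goA a (digitsOf b) with
  | none => false
  | some r => if (PySem.Set.ofList r).length = 1 then true else false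

-- ===== PORT B =====
def is_sub_in_l_alt (a : List Int) (b : Int) : Bool :=
  let cb := (digitsOf b).foldl (fun d x => d.insert x (d.getD x 0 + 1)) (PySem.Dict.empty : PySem.Dict Int Int)
  let ca := a.foldl (fun d x => d.insert x (d.getD x 0 + 1)) (PySem.Dict.empty : PySem.Dict Int Int)
  if ca.keys.any (fun k => decide (cb.getD k 0 < ca.getD k 0)) then false
  else decide ((cb.keys.filter (fun k => decide (0 < cb.getD k 0 - ca.getD k 0))).length = 1)

-- ===== PRECONDITION & SPEC =====
-- Pre_ excludes b < 0, on which A raises ValueError (int('-') while mapping over str(b)).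
def Pre_is_sub_in_l (a : List Int) (b : Int) : Prop := 0 ≤ b
instance (a : List Int) (b : Int) : Decidable (Pre_is_sub_in_l a b) := by unfold Pre_is_sub_in_l; infer_instance
def pvWitness_is_sub_in_l : List Int × Int := ([1, 2], 121)

def Spec_is_sub_in_l (a : List Int) (b : Int) (out : Bool) : Prop := out = is_sub_in_l_alt a b
instance (a : List Int) (b : Int) (out : Bool) : Decidable (Spec_is_sub_in_l a b out) := by unfold Spec_is_sub_in_l; infer_instance

-- ===== CLAIM (what is proved, stated in full; the proofs are below) =====
def Claim_equal_is_sub_in_l : Prop := ∀ (a : List Int) (b : Int), Dom_is_sub_in_l a b → Pre_is_sub_in_l a b → Spec_is_sub_in_l a b (is_sub_in_l a b)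

-- ===== LEMMAS AND PROOFS =====

-- count effect of erasing one occurrence, combined with the cons-count arithmetic
theorem count_le_erase_iff (x : Int) (xs bs : List Int) (hx : x ∈ bs) :
    (∀ y : Int, xs.count y ≤ (bs.erase x).count y) ↔
      (∀ y : Int, (x :: xs).count y ≤ bs.count y) := by
  have hxc : 0 < bs.count x := List.count_pos_iff.mpr hx
  constructor
  · intro h y
    have hy := h y
    rw [List.count_erase] at hy
    rw [List.count_cons]
    by_cases hxy : x = y
    · subst hxy; simp only [BEq.rfl, if_true] at hy ⊢; omega
    · simp only [beq_iff_eq, hxy, if_false] at hy ⊢; omega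
  · intro h y
    have hy := h y
    rw [List.count_cons] at hy
    rw [List.count_erase]
    by_cases hxy : x = y
    · subst hxy; simp only [BEq.rfl, if_true] at hy ⊢; omega
    · simp only [beq_iff_eq, hxy, if_false] at hy ⊢; omega

-- goA fails exactly when a is not multiset-contained in bs
theorem goA_eq_none_iff (a bs : List Int) :
    goA a bs = none ↔ ¬ (∀ y : Int, a.count y ≤ bs.count y) := by
  induction a generalizing bs with
  | nil => simp [goA]
  | cons x xs ih =>
    by_cases hx : x ∈ bs
    · rw [goA, PySem.List.remove?_eq_some_erase bs x hx]
      rw [ih, not_iff_not, count_le_erase_iff x xs bs hx]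
    · rw [goA, (PySem.List.remove?_eq_none_iff bs x).mpr hx]
      have hno : ¬ ((x :: xs).count x ≤ bs.count x) := by
        have h0 : bs.count x = 0 := List.count_eq_zero.mpr hx
        simp [h0]
      exact ⟨fun _ hall => hno (hall x), fun _ => rfl⟩

-- on success the result's counts are the pointwise differences
theorem goA_eq_some_count (a : List Int) : ∀ (bs r : List Int), goA a bs = some r →
    ∀ y : Int, r.count y = bs.count y - a.count y := by
  induction a with
  | nil => intro bs r h y; cases h; simp
  | cons x xs ih =>
    intro bs r h y
    rw [goA] at h
    cases hrem : PySem.List.remove? bs x with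
    | none => rw [hrem] at h; cases h
    | some bs' =>
      rw [hrem] at h
      have hx : x ∈ bs := by
        by_contra hx
        rw [(PySem.List.remove?_eq_none_iff bs x).mpr hx] at hrem; cases hrem
      rw [PySem.List.remove?_eq_some_erase bs x hx] at hrem
      cases hrem
      have hr := ih _ _ h y
      rw [List.count_erase] at hr
      rw [List.count_cons]
      by_cases hxy : x = y
      · subst hxy; simp only [BEq.rfl, if_true] at hr ⊢; omega
      · simp only [beq_iff_eq, hxy, if_false] at hr ⊢; omega

-- two nodup lists with the same members have the same length
theorem length_eq_of_nodup_of_mem_iff {l₁ l₂ : List Int}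
    (h₁ : l₁.Nodup) (h₂ : l₂.Nodup) (h : ∀ x, x ∈ l₁ ↔ x ∈ l₂) :
    l₁.length = l₂.length :=
  (List.perm_of_nodup_nodup_toFinset_eq h₁ h₂ (by ext x; simp [List.mem_toFinset, h x])).length_eq

theorem is_sub_in_l_eq_alt (a : List Int) (b : Int) : is_sub_in_l a b = is_sub_in_l_alt a b := by
  unfold is_sub_in_l is_sub_in_l_alt
  rw [PySem.Dict.foldl_insert_getD_add_one_eq_counter, PySem.Dict.foldl_insert_getD_add_one_eq_counter]
  simp only [PySem.Dict.getD_counter, PySem.Dict.keys_counter]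
  by_cases hsub : ∀ y : Int, a.count y ≤ (digitsOf b).count y
  · -- subset holds: goA succeeds and the any-test is false
    cases hgo : goA a (digitsOf b) with
    | none => exact absurd hsub ((goA_eq_none_iff _ _).mp hgo)
    | some r =>
      have hcnt := goA_eq_some_count a _ _ hgo
      have hany : (PySem.Set.ofList a).any
          (fun k => decide (((digitsOf b).count k : Int) < (a.count k : Int))) = false := by
        simp only [List.any_eq_false]
        intro k _
        simp only [decide_eq_true_eq, not_lt]
        exact_mod_cast hsub k
      rw [hany]
      simp only [Bool.false_eq_true, if_false]
      have hlen : (PySem.Set.ofList r).length =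
          ((PySem.Set.ofList (digitsOf b)).filter
            (fun k => decide ((0 : Int) < ((digitsOf b).count k : Int) - (a.count k : Int)))).length := by
        apply length_eq_of_nodup_of_mem_iff (PySem.Set.nodup_ofList _)
        · exact List.Nodup.filter _ (PySem.Set.nodup_ofList _)
        · intro x
          simp only [List.mem_filter, PySem.Set.mem_ofList, decide_eq_true_eq]
          constructor
          · intro hxr
            have hrc : 0 < r.count x := List.count_pos_iff.mpr hxr
            have := hcnt x
            have hle := hsub x
            constructor
            · exact List.count_pos_iff.mp (by omega)
            · omega
          · rintro ⟨hxd, hpos⟩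
            have := hcnt x
            have hle := hsub x
            have : 0 < r.count x := by
              have hpos' : (a.count x : Int) < ((digitsOf b).count x : Int) := by omega
              have : a.count x < (digitsOf b).count x := by exact_mod_cast hpos'
              omega
            exact List.count_pos_iff.mp this
      rw [hlen]
      split <;> simp_all
  · -- subset fails: goA returns none and the any-test is true
    rw [(goA_eq_none_iff _ _).mpr hsub]
    push Not at hsub
    obtain ⟨y, hy⟩ := hsub
    have hya : y ∈ a := List.count_pos_iff.mp (by omega)
    have hany : (PySem.Set.ofList a).any
        (fun k => decide (((digitsOf b).count k : Int) < (a.count k : Int))) = true := by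
      simp only [List.any_eq_true]
      exact ⟨y, (PySem.Set.mem_ofList _ _).mpr hya, by simp only [decide_eq_true_eq]; exact_mod_cast hy⟩
    rw [hany]
    simp

-- ===== VERDICT (by name: the statement is the Claim_ definition above) =====
theorem is_sub_in_l_spec : Claim_equal_is_sub_in_l := by
  intro a b _ _
  unfold Spec_is_sub_in_l
  exact is_sub_in_l_eq_alt a b
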